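-- pv_equiv track=rewrite | github.com/diu-uf-bordeaux/bloc2 | Jour 1/tris.py | entasser
-- ===== SOURCE A (Python) =====
-- def estIndice(T,i):
--     return(0<=i and i<len(T))
--
-- def echange(T,i,j):
--     assert(estIndice(T,i) and estIndice(T,j))
--     aux  = T[i]
--     T[i] = T[j]
--     T[j] = aux
--
-- def gauche(i):
--     return(2*i+1)
--
-- def droite(i):
--     return(2*(i+1))
--
-- def maximum(T,i,limite):
--     assert(0<=i and i<limite and limite<=len(T))
--     iMax = i
--     g = gauche(i)
--     d = droite(i)
--     # maximum entre T[i], T[g] et T[d] avec getd<limite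
--     if g<limite and T[g]>T[iMax]:
--         iMax = g
--     if d<limite and T[ d]>T[iMax]:
--         iMax = d
--     return(iMax)
--
-- def entasser(T,i,limite):
--     iMax = maximum(T,i,limite)
--     nb_etapes = 0
--     while iMax!=i:
--         echange(T,i,iMax)
--         nb_etapes += 1
--         i    = iMax
--         iMax = maximum(T,i,limite)
--     return(nb_etapes)
-- ===== SOURCE B (Python) =====
-- def estIndice(T,i):
--     return(0<=i and i<len(T))
--
-- def echange(T,i,j):
--     assert(estIndice(T,i) and estIndice(T,j))
--     aux  = T[i]
--     T[i] = T[j]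
--     T[j] = aux
--
-- def gauche(i):
--     return(2*i+1)
--
-- def droite(i):
--     return(2*(i+1))
--
-- def maximum(T,i,limite):
--     assert(0<=i and i<limite and limite<=len(T))
--     iMax = i
--     g = gauche(i)
--     d = droite(i)
--     if g<limite and T[g]>T[iMax]:
--         iMax = g
--     if d<limite and T[ d]>T[iMax]:
--         iMax = d
--     return(iMax)
--
-- # B: recursive max-heapify instead of the while loop; same helpers, same in-place mutation.
-- def entasser(T,i,limite):
--     iMax = maximum(T,i,limite)
--     if iMax == i:
--         return 0
--     echange(T,i,iMax)
--     return 1 + entasser(T,iMax,limite)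
-- ===== Notes on version B (the rewrite author's own statement) =====
-- stated objective: simpler
-- what changed: Replaces the explicit while loop with an accumulator by the textbook recursive max-heapify: compute the max child index, swap once, and return 1 + the recursive sift-down of the affected subtree.
import Mathlib
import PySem

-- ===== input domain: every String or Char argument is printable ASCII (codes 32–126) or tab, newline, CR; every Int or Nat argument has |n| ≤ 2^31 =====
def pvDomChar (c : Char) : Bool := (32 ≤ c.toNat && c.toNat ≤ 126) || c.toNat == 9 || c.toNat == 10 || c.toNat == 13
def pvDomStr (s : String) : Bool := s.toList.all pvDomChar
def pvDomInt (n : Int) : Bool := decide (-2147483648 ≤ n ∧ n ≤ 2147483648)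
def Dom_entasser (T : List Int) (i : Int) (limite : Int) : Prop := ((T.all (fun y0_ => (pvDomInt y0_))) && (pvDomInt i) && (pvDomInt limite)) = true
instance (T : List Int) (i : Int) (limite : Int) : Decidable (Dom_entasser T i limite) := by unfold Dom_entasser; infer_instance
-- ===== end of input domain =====

-- B replaces A's while loop (swap counter accumulator) by the textbook recursive max-heapify
-- returning 1 + recursive sift-down; both mutate T identically in Python, the proof is about the return value.


-- ===== PORT A =====
-- T[k]: inside Pre_ every accessed index is in range, so the default 0 is never used.
def pygetE (T : List Int) (k : Int) : Int := (PySem.List.pyGet? T k).getD 0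

-- echange: aux = T[i]; T[i] = T[j]; T[j] = aux.  Inside Pre_ both indices are
-- nonnegative and in range, so .toNat is exact here.
def echangeE (T : List Int) (i j : Int) : List Int :=
  (T.set i.toNat (pygetE T j)).set j.toNat (pygetE T i)

-- maximum(T,i,limite) (the assert raises exactly outside Pre_, which Pre_ excludes)
def maximumE (T : List Int) (i limite : Int) : Int :=
  let g := 2 * i + 1
  let d := 2 * (i + 1)
  let iMax := if g < limite ∧ pygetE T g > pygetE T i then g else i
  if d < limite ∧ pygetE T d > pygetE T iMax then d else iMax

-- A's while loop with its swap counter; the conjuncts i < iMax ∧ i < limite are a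
-- totality guard (they always hold inside Pre_ when iMax ≠ i).
def entasserLoop (T : List Int) (i limite nb : Int) : Int :=
  let iMax := maximumE T i limite
  if iMax = i then nb
  else if _h : i < iMax ∧ i < limite then
    entasserLoop (echangeE T i iMax) iMax limite (nb + 1)
  else nb
termination_by (limite - i).toNat
decreasing_by omega

def entasser (T : List Int) (i : Int) (limite : Int) : Int :=
  entasserLoop T i limite 0

-- ===== PORT B =====
-- recursive max-heapify: one swap then 1 + sift-down of the affected child subtree.
-- Same totality guard; inside Pre_ it always holds when iMax ≠ i.
def entasser_alt (T : List Int) (i : Int) (limite : Int) : Int :=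
  let iMax := maximumE T i limite
  if iMax = i then 0
  else if _h : i < iMax ∧ i < limite then
    1 + entasser_alt (echangeE T i iMax) iMax limite
  else 1
termination_by (limite - i).toNat
decreasing_by omega

-- ===== PRECONDITION & SPEC =====
-- Pre_: exactly the assert of maximum(T,i,limite); outside it Python A raises AssertionError.
def Pre_entasser (T : List Int) (i : Int) (limite : Int) : Prop :=
  0 ≤ i ∧ i < limite ∧ limite ≤ (T.length : Int)
instance (T : List Int) (i : Int) (limite : Int) : Decidable (Pre_entasser T i limite) := by unfold Pre_entasser; infer_instance

def pvWitness_entasser : List Int × Int × Int := ([1, 5, 3, 2, 4], 0, 5)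

def Spec_entasser (T : List Int) (i : Int) (limite : Int) (out : Int) : Prop := out = entasser_alt T i limite
instance (T : List Int) (i : Int) (limite : Int) (out : Int) : Decidable (Spec_entasser T i limite out) := by unfold Spec_entasser; infer_instance

-- ===== CLAIM (what is proved, stated in full; the proofs are below) =====
def Claim_equal_entasser : Prop := ∀ (T : List Int) (i : Int) (limite : Int), Dom_entasser T i limite → Pre_entasser T i limite → Spec_entasser T i limite (entasser T i limite)

-- ===== LEMMAS AND PROOFS =====

lemma maximumE_range (T : List Int) (i limite : Int) (h0 : 0 ≤ i) :
    maximumE T i limite = i ∨ (i < maximumE T i limite ∧ maximumE T i limite < limite) := by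
  unfold maximumE
  dsimp only
  split_ifs with h1 h2 h3 <;> omega

lemma echangeE_length (T : List Int) (i j : Int) :
    (echangeE T i j).length = T.length := by
  simp [echangeE]

lemma loop_eq_alt : ∀ (n : Nat) (T : List Int) (i limite nb : Int),
    (limite - i).toNat ≤ n → 0 ≤ i → i < limite → limite ≤ (T.length : Int) →
    entasserLoop T i limite nb = nb + entasser_alt T i limite := by
  intro n
  induction n with
  | zero => intro T i limite nb hn h0 hil hl; omega
  | succ n ih =>
    intro T i limite nb hn h0 hil hl
    rw [entasserLoop, entasser_alt]
    rcases maximumE_range T i limite h0 with heq | ⟨hgt, hlt⟩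
    · simp [heq]
    · have hne : ¬ maximumE T i limite = i := by omega
      have hg : i < maximumE T i limite ∧ i < limite := ⟨hgt, hil⟩
      rw [if_neg hne, if_neg hne, dif_pos hg, dif_pos hg]
      have := ih (echangeE T i (maximumE T i limite)) (maximumE T i limite) limite (nb + 1)
        (by omega) (by omega) hlt (by rw [echangeE_length]; exact hl)
      omega

-- ===== VERDICT (by name: the statement is the Claim_ definition above) =====
theorem entasser_spec : Claim_equal_entasser := by
  intro T i limite _hdom ⟨h0, hil, hl⟩
  unfold Spec_entasser entasser
  have := loop_eq_alt (limite - i).toNat T i limite 0 le_rfl h0 hil hl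
  omega
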